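-- pv_equiv track=rewrite | github.com/gwenmich/codewars_solutions | python_solutions/8_kyu/contamination_#1_string.py | contamination
-- ===== SOURCE A (Python) =====
-- def contamination(text, char):
--     new_text = ""
--     for letter in text:
--         if letter == " ":
--             return" "
--         else:
--             new_text += char
--     return new_text
-- ===== SOURCE B (Python) =====
-- def contamination(text, char):
--     return " " if " " in text else char * len(text)
-- ===== Notes on version B (the rewrite author's own statement) =====
-- stated objective: simpler
-- what changed: Replaces the character-by-character loop with a single space-membership test plus string multiplication (char * len(text)), preserving the early-return-on-space behaviour as a closed form.
import Mathlib
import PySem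

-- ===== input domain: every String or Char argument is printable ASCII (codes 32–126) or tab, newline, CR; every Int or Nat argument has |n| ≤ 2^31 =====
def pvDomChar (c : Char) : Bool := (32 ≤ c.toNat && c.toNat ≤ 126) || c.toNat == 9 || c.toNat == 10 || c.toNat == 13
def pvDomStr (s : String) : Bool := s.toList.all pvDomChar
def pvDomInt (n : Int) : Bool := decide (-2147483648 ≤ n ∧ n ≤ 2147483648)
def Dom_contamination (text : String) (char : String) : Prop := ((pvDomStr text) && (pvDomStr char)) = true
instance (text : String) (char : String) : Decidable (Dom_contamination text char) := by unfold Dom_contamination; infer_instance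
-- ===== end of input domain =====

-- B replaces A's per-character loop with a space-membership test plus string multiplication (simpler closed form).


-- ===== PORT A =====
-- the for-loop with early return on ' ' and 'new_text += char'; the string
-- accumulator is kept as a List Char (strings are ported via their char lists)
def contaminationGo (charL : List Char) : List Char → List Char → String
  | [], acc => String.ofList acc
  | c :: rest, acc => if c = ' ' then " " else contaminationGo charL rest (acc ++ charL)

def contamination (text : String) (char : String) : String :=
  contaminationGo char.toList text.toList []

-- ===== PORT B =====
-- '" " in text' for the one-character needle " " is membership of ' ' in text;
-- 'char * len(text)' is PySem.List.pyRepeat (exact: len(text) ≥ 0)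
def contamination_alt (text : String) (char : String) : String :=
  if ' ' ∈ text.toList then " "
  else String.ofList (PySem.List.pyRepeat char.toList (text.toList.length : Int))

-- ===== PRECONDITION & SPEC =====
def Spec_contamination (text : String) (char : String) (out : String) : Prop := out = contamination_alt text char
instance (text : String) (char : String) (out : String) : Decidable (Spec_contamination text char out) := by unfold Spec_contamination; infer_instance

-- ===== CLAIM (what is proved, stated in full; the proofs are below) =====
def Claim_equal_contamination : Prop := ∀ (text : String) (char : String), Dom_contamination text char → Spec_contamination text char (contamination text char)

-- ===== LEMMAS AND PROOFS =====
theorem contaminationGo_eq (charL : List Char) (cs acc : List Char) :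
    contaminationGo charL cs acc =
      if ' ' ∈ cs then " "
      else String.ofList (acc ++ (List.replicate cs.length charL).flatten) := by
  induction cs generalizing acc with
  | nil => simp [contaminationGo]
  | cons c rest ih =>
    by_cases hc : c = ' '
    · simp [contaminationGo, hc]
    · simp only [contaminationGo, hc, if_false, ih, List.mem_cons, List.length_cons,
        List.replicate_succ, List.flatten_cons, List.append_assoc]
      simp [eq_comm, hc]

-- ===== VERDICT (by name: the statement is the Claim_ definition above) =====
theorem contamination_spec : Claim_equal_contamination := by
  intro text char _
  unfold Spec_contamination contamination contamination_alt
  rw [contaminationGo_eq]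
  simp [PySem.List.pyRepeat]
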